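-- pv_equiv track=rewrite | github.com/kieran-cooney/spt_numerical_classificiation | code/SPTOptimization/tenpy_leg_label_utils.py | conjugate_grouped_physical_leg_label
-- ===== SOURCE A (Python) =====
-- def conjugate_single_physical_leg_label(label):
--     return label + '*'
--
-- def conjugate_grouped_physical_leg_label(label):
--     _, *body, _ = label
--     single_labels = ''.join(body).split('.')
--
--     conjugate_labels = [
--         conjugate_single_physical_leg_label(l)
--         for l in single_labels
--     ]
--
--     conjugate_body = '.'.join(conjugate_labels)
--     out = '(' + conjugate_body + ')'
--
--     return out
-- ===== SOURCE B (Python) =====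
-- def conjugate_grouped_physical_leg_label(label):
--     _, *body, _ = label
--     inner = ''.join(body)
--     return '(' + inner.replace('.', '*.') + '*)'
-- ===== Notes on version B (the rewrite author's own statement) =====
-- stated objective: simpler
-- what changed: Replaces the split-into-parts / append-star-to-each / rejoin pipeline with a single string substitution: every '.' becomes '*.' and one trailing '*' is added before the closing paren.
import Mathlib
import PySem

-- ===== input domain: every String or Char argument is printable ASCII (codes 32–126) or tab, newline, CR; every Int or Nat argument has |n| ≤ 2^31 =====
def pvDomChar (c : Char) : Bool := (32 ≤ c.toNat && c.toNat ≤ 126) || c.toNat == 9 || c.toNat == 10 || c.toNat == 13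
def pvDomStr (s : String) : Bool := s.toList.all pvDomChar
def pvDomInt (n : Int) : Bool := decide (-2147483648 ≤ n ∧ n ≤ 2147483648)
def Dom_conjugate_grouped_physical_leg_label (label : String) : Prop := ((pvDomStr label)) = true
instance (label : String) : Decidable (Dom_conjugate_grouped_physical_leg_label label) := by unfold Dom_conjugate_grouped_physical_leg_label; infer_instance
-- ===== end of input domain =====

-- B replaces A's split / append-'*'-to-each / rejoin pipeline by one substitution ('.' -> '*.')
-- plus a trailing '*'; objective: simpler.

-- ===== PORT A =====
-- helper of A: label + '*'
def conjugate_single_physical_leg_label (label : List Char) : List Char := label ++ ['*']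

def conjugate_grouped_physical_leg_label (label : String) : String :=
  let body := (label.toList.drop 1).dropLast                      -- _, *body, _ = label
  let single_labels := PySem.Chars.splitOn body ['.']             -- ''.join(body).split('.')
  let conjugate_labels := single_labels.map (fun l => conjugate_single_physical_leg_label l)
  let conjugate_body := PySem.Chars.join ['.'] conjugate_labels   -- '.'.join(...)
  String.ofList (['('] ++ conjugate_body ++ [')'])                    -- '(' + conjugate_body + ')'

-- ===== PORT B =====
def conjugate_grouped_physical_leg_label_alt (label : String) : String :=
  let body := (label.toList.drop 1).dropLast                      -- _, *body, _ = label
  String.ofList (['('] ++ PySem.Chars.replace body ['.'] ['*', '.'] ++ ['*', ')'])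
                                                                  -- '(' + inner.replace('.','*.') + '*)'

-- ===== PRECONDITION & SPEC =====
-- Pre_ excludes strings of length < 2, on which the unpacking '_, *body, _ = label' raises ValueError.
def Pre_conjugate_grouped_physical_leg_label (label : String) : Prop := 2 ≤ label.toList.length
instance (label : String) : Decidable (Pre_conjugate_grouped_physical_leg_label label) := by unfold Pre_conjugate_grouped_physical_leg_label; infer_instance
def pvWitness_conjugate_grouped_physical_leg_label : String := "(a.b)"

def Spec_conjugate_grouped_physical_leg_label (label : String) (out : String) : Prop := out = conjugate_grouped_physical_leg_label_alt label
instance (label : String) (out : String) : Decidable (Spec_conjugate_grouped_physical_leg_label label out) := by unfold Spec_conjugate_grouped_physical_leg_label; infer_instance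

-- ===== CLAIM (what is proved, stated in full; the proofs are below) =====
def Claim_equal_conjugate_grouped_physical_leg_label : Prop := ∀ (label : String), Dom_conjugate_grouped_physical_leg_label label → Pre_conjugate_grouped_physical_leg_label label → Spec_conjugate_grouped_physical_leg_label label (conjugate_grouped_physical_leg_label label)

-- ===== LEMMAS AND PROOFS =====

-- the per-character effect both pipelines realise: '.' becomes '*.', everything else stays
def pvStar (c : Char) : List Char := if c = '.' then ['*', '.'] else [c]

-- a fuel-free description of A's split accumulator
def pvSplitF (l cur : List Char) : List (List Char) :=
  match l with
  | [] => [cur.reverse]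
  | c :: t => if c = '.' then cur.reverse :: pvSplitF t [] else pvSplitF t (c :: cur)

theorem pvSplitF_ne_nil (l cur : List Char) : pvSplitF l cur ≠ [] := by
  induction l generalizing cur with
  | nil => simp [pvSplitF]
  | cons c t ih => simp only [pvSplitF]; split_ifs <;> simp [ih]

theorem pv_rep_go (l acc : List Char) (fuel : Nat) (h : l.length ≤ fuel) :
    PySem.Chars.replace.go ['.'] ['*', '.'] fuel l acc = acc.reverse ++ l.flatMap pvStar := by
  induction l generalizing fuel acc with
  | nil => cases fuel <;> simp [PySem.Chars.replace.go]
  | cons c t ih =>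
    cases fuel with
    | zero => simp at h
    | succ f =>
      have hf : t.length ≤ f := by simpa using Nat.le_of_succ_le_succ h
      simp only [PySem.Chars.replace.go, List.isPrefixOf, Bool.and_true,
        List.length_cons, List.length_nil, List.drop_succ_cons, List.drop_zero,
        Nat.zero_add]
      by_cases hc : c = '.'
      · subst hc
        simp only [beq_self_eq_true, reduceIte, ih _ _ hf]
        simp [pvStar]
      · have hbc : ('.' == c) = false := beq_eq_false_iff_ne.mpr (Ne.symm hc)
        simp only [hbc, Bool.false_eq_true, reduceIte, ih _ _ hf]
        simp [pvStar, hc]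

theorem pv_split_go (l cur : List Char) (acc : List (List Char)) (fuel : Nat) (h : l.length < fuel) :
    PySem.Chars.splitOn.go ['.'] fuel l cur acc = acc.reverse ++ pvSplitF l cur := by
  induction l generalizing fuel cur acc with
  | nil =>
    cases fuel with
    | zero => simp at h
    | succ f => simp [PySem.Chars.splitOn.go, pvSplitF]
  | cons c t ih =>
    cases fuel with
    | zero => simp at h
    | succ f =>
      have hf : t.length < f := by simpa using Nat.lt_of_succ_lt_succ h
      simp only [PySem.Chars.splitOn.go, List.isPrefixOf, Bool.and_true,
        List.length_cons, List.length_nil, List.drop_succ_cons, List.drop_zero,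
        Nat.zero_add]
      by_cases hc : c = '.'
      · subst hc
        simp only [beq_self_eq_true, reduceIte, ih _ _ _ hf]
        simp [pvSplitF]
      · have hbc : ('.' == c) = false := beq_eq_false_iff_ne.mpr (Ne.symm hc)
        simp only [hbc, Bool.false_eq_true, reduceIte, ih _ _ _ hf]
        simp [pvSplitF, hc]

theorem pv_join_splitF (l cur : List Char) :
    PySem.Chars.join ['.'] ((pvSplitF l cur).map (fun p => conjugate_single_physical_leg_label p))
      = cur.reverse ++ l.flatMap pvStar ++ ['*'] := by
  induction l generalizing cur with
  | nil => simp [pvSplitF, conjugate_single_physical_leg_label, PySem.Chars.join_singleton]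
  | cons c t ih =>
    by_cases hc : c = '.'
    · subst hc
      simp only [pvSplitF, reduceIte, List.map_cons]
      obtain ⟨b, bs, hb⟩ := List.exists_cons_of_ne_nil
        (by simp [pvSplitF_ne_nil] : (pvSplitF t []).map (fun p => conjugate_single_physical_leg_label p) ≠ [])
      rw [hb, PySem.Chars.join_cons_cons, ← hb, ih]
      simp [conjugate_single_physical_leg_label, pvStar]
    · simp only [pvSplitF, if_neg hc]
      rw [ih]
      simp [pvStar, hc]

theorem pv_key (l : List Char) :
    PySem.Chars.join ['.'] ((PySem.Chars.splitOn l ['.']).map (fun p => conjugate_single_physical_leg_label p))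
      = PySem.Chars.replace l ['.'] ['*', '.'] ++ ['*'] := by
  rw [PySem.Chars.splitOn, pv_split_go l [] [] (l.length + 1) (Nat.lt_succ_self _)]
  rw [PySem.Chars.replace]
  simp only [List.isEmpty_cons, Bool.false_eq_true, if_false]
  rw [pv_rep_go l [] l.length (le_refl _)]
  simpa using pv_join_splitF l []

-- ===== VERDICT (by name: the statement is the Claim_ definition above) =====
theorem conjugate_grouped_physical_leg_label_spec : Claim_equal_conjugate_grouped_physical_leg_label := by
  intro label _ _
  unfold Spec_conjugate_grouped_physical_leg_label
  unfold conjugate_grouped_physical_leg_label conjugate_grouped_physical_leg_label_alt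
  simp [pv_key, List.append_assoc]
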